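-- pv_equiv track=rewrite | github.com/Tamura3480/Characteristic-polynomial-data | compute_the_characteristic_polynomial.py | generate_average_quasi_polynomial
-- ===== SOURCE A (Python) =====
-- from typing import List
--
-- def generate_average_quasi_polynomial(k :int, quasi_polynomial :List[List[int]]) -> List[List[int]]:
--     period=len(quasi_polynomial)
--     d=len(quasi_polynomial[0])
--     if period%k!=0:
--         raise ValueError
--     average_quasi_polynomial=[]
--     m=int(period/k)
--     for i in range(k):
--         sum_quasi_polynomial=[0]*d
--         for j in range(m):
--             sum_quasi_polynomial=list(map(lambda x,y:x+y, sum_quasi_polynomial,quasi_polynomial[(i+j*k)%period]))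
--         average_quasi_polynomial.append(sum_quasi_polynomial)
--     return average_quasi_polynomial
-- ===== SOURCE B (Python) =====
-- from typing import List
--
-- def generate_average_quasi_polynomial(k: int, quasi_polynomial: List[List[int]]) -> List[List[int]]:
--     period = len(quasi_polynomial)
--     d = len(quasi_polynomial[0])
--     if period % k != 0:
--         raise ValueError
--     # single pass: scatter each row into its residue bucket, then reduce each
--     # bucket by transposing it (zip) and summing the columns
--     buckets = [[] for _ in range(k)]
--     for idx, row in enumerate(quasi_polynomial):
--         buckets[idx % k].append(row)
--     return [[sum(col) for col in zip([0] * d, *bucket)] for bucket in buckets]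
-- ===== Notes on version B (the rewrite author's own statement) =====
-- stated objective: alternative
-- what changed: A computes each residue-class sum independently with a running elementwise accumulator over strided modulo indices (k x m nested gather); B instead makes one scatter pass that groups the rows into k residue buckets and then reduces each bucket by transposing it with zip and summing whole columns with the builtin sum.
-- outside the precondition, e.g. on generate_average_quasi_polynomial(-1, [[1]]): A returns [], B raises IndexError
import Mathlib
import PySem

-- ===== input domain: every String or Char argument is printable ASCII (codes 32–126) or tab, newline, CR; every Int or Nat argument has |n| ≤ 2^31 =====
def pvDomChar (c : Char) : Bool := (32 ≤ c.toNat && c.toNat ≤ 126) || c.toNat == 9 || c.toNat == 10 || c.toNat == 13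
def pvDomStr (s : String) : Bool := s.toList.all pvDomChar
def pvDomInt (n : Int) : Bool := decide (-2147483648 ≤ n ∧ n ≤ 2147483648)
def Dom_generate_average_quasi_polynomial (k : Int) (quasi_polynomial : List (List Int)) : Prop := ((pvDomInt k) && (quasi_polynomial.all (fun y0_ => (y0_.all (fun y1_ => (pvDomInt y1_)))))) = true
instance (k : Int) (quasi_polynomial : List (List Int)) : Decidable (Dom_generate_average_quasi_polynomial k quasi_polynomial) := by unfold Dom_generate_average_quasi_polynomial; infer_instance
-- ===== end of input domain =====

-- B replaces A's per-residue strided gather with a running elementwise accumulator by one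
-- scatter pass grouping the rows into k residue buckets, each bucket then reduced by
-- transposing it (zip) and summing whole columns (objective: alternative).

-- ===== PORT A =====
def generate_average_quasi_polynomial (k : Int) (quasi_polynomial : List (List Int)) : List (List Int) :=
  let period : Int := quasi_polynomial.length
  -- d = len(quasi_polynomial[0]); quasi_polynomial[0] raises IndexError on [] — excluded by Pre_
  let d : Nat := ((PySem.List.pyGet? quasi_polynomial 0).getD []).length
  -- `if period % k != 0: raise ValueError` (and ZeroDivisionError for k = 0) — excluded by Pre_
  let m : Int := PySem.Int.truncdiv period k  -- int(period/k); exact: the guard gives k ∣ period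
  (PySem.List.pyRange 0 k).map (fun i =>
    (PySem.List.pyRange 0 m).foldl (fun s j =>
      -- map(lambda x,y: x+y, s, row) truncates to the shorter list = zipWith
      List.zipWith (· + ·) s
        ((PySem.List.pyGet? quasi_polynomial (PySem.Int.mod (i + j * k) period)).getD []))
      (List.replicate d 0))

-- ===== PORT B =====
-- zip(first, *others): hand-ported (variadic zip) — columns until the shortest argument ends; exact
def pvZip (first : List Int) (others : List (List Int)) : List (List Int) :=
  match first with
  | [] => []
  | x :: xs =>
    if others.all (fun o => o ≠ []) then
      (x :: others.map (fun o => o.headD 0)) :: pvZip xs (others.map (fun o => o.tail))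
    else []

def generate_average_quasi_polynomial_alt (k : Int) (quasi_polynomial : List (List Int)) : List (List Int) :=
  let d : Nat := ((PySem.List.pyGet? quasi_polynomial 0).getD []).length
  -- `if period % k != 0: raise ValueError` (and ZeroDivisionError for k = 0) — excluded by Pre_
  -- buckets = [[] for _ in range(k)]; buckets[idx % k].append(row)  (IndexError for k < 0 — excluded by Pre_)
  let buckets : List (List (List Int)) :=
    (PySem.List.enumerate quasi_polynomial).foldl
      (fun acc p =>
        let i := PySem.Int.mod p.1 k
        PySem.List.pySetD acc i (PySem.List.pyGetD acc i [] ++ [p.2]))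
      ((PySem.List.pyRange 0 k).map (fun _ => ([] : List (List Int))))
  -- [[sum(col) for col in zip([0]*d, *bucket)] for bucket in buckets]
  buckets.map (fun bucket => (pvZip (List.replicate d 0) bucket).map List.sum)

-- ===== PRECONDITION & SPEC =====
-- Pre_ excludes exactly: [] (IndexError at quasi_polynomial[0] in both), k = 0 (ZeroDivisionError
-- at period % k in both), period % k ≠ 0 (A's explicit ValueError), and k < 0 — there A's
-- divisibility guard can pass yet range(k) is empty so A accidentally returns [], while B's
-- scatter pass raises IndexError on the empty bucket list (see claim cites).
def Pre_generate_average_quasi_polynomial (k : Int) (quasi_polynomial : List (List Int)) : Prop :=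
  quasi_polynomial ≠ [] ∧ 0 < k ∧ PySem.Int.mod (quasi_polynomial.length : Int) k = 0
instance (k : Int) (quasi_polynomial : List (List Int)) : Decidable (Pre_generate_average_quasi_polynomial k quasi_polynomial) := by unfold Pre_generate_average_quasi_polynomial; infer_instance
def pvWitness_generate_average_quasi_polynomial : Int × List (List Int) := (2, [[1, 2], [3, 4]])

def Spec_generate_average_quasi_polynomial (k : Int) (quasi_polynomial : List (List Int)) (out : List (List Int)) : Prop := out = generate_average_quasi_polynomial_alt k quasi_polynomial
instance (k : Int) (quasi_polynomial : List (List Int)) (out : List (List Int)) : Decidable (Spec_generate_average_quasi_polynomial k quasi_polynomial out) := by unfold Spec_generate_average_quasi_polynomial; infer_instance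

-- ===== CLAIM (what is proved, stated in full; the proofs are below) =====
def Claim_equal_generate_average_quasi_polynomial : Prop := ∀ (k : Int) (quasi_polynomial : List (List Int)), Dom_generate_average_quasi_polynomial k quasi_polynomial → Pre_generate_average_quasi_polynomial k quasi_polynomial → Spec_generate_average_quasi_polynomial k quasi_polynomial (generate_average_quasi_polynomial k quasi_polynomial)

-- ===== LEMMAS AND PROOFS =====

-- a list is the map of its getD over range of its length
lemma pvMap_range_getD {α : Type} (a : List α) (dflt : α) :
    (List.range a.length).map (fun i => a.getD i dflt) = a := by
  apply List.ext_getElem (by simp)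
  intro i h1 h2
  simp [List.getD_eq_getElem?_getD, h2]

-- zip of the seed row alone: one singleton column per entry
lemma pvZip_nil (z : List Int) : pvZip z [] = z.map (fun x => [x]) := by
  induction z with
  | nil => rfl
  | cons x xs ih => simp [pvZip, ih]

-- absorbing one row of the transpose into the seed keeps the column sums
lemma pvZip_sum_cons (z r : List Int) (rs : List (List Int)) :
    (pvZip z (r :: rs)).map List.sum = (pvZip (List.zipWith (· + ·) z r) rs).map List.sum := by
  induction z generalizing r rs with
  | nil => simp [pvZip]
  | cons x xs ih =>
    cases r with
    | nil => simp [pvZip]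
    | cons y ys =>
      simp only [pvZip, List.all_cons, ne_eq, reduceCtorEq, not_false_eq_true, decide_true,
        Bool.true_and, List.zipWith_cons_cons, List.map_cons, List.tail_cons, List.headD_cons]
      split_ifs with h
      · simp only [List.map_cons]
        congr 1
        · simp [add_assoc]
        · exact ih ys (rs.map (·.tail))
      · rfl

-- column sums of the seeded transpose = elementwise fold of the rows into the seed
lemma pvZip_sum_fold (rows : List (List Int)) (z : List Int) :
    (pvZip z rows).map List.sum = rows.foldl (List.zipWith (· + ·)) z := by
  induction rows generalizing z with
  | nil => simp [pvZip_nil, List.map_map, Function.comp_def]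
  | cons r rs ih => rw [List.foldl_cons, ← ih, pvZip_sum_cons]

-- the rows of `rows` (positions counted from s) whose position ≡ i (mod K), in order
def pvPick (K i : Nat) : Nat → List (List Int) → List (List Int)
  | _, [] => []
  | s, r :: rs => if s % K = i then r :: pvPick K i (s + 1) rs else pvPick K i (s + 1) rs

lemma pvPick_append (K i : Nat) (a b : List (List Int)) (s : Nat) :
    pvPick K i s (a ++ b) = pvPick K i s a ++ pvPick K i (s + a.length) b := by
  induction a generalizing s with
  | nil => simp [pvPick]
  | cons r rs ih =>
    simp only [List.cons_append, pvPick, ih, List.length_cons]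
    have : s + 1 + rs.length = s + (rs.length + 1) := by omega
    rw [this]
    split <;> rfl

lemma pvPick_none (K i : Nat) (a : List (List Int)) (s : Nat)
    (h : ∀ t < a.length, (s + t) % K ≠ i) : pvPick K i s a = [] := by
  induction a generalizing s with
  | nil => rfl
  | cons r rs ih =>
    have h0 : s % K ≠ i := by simpa using h 0 (by simp)
    simp only [pvPick, if_neg h0]
    exact ih (s + 1) (fun t ht => by
      have := h (t + 1) (by simpa using Nat.succ_lt_succ ht)
      simpa [Nat.add_assoc, Nat.add_comm 1 t] using this)

-- within one aligned block of K rows the pick is exactly the i-th row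
lemma pvPick_block (K i : Nat) (hi : i < K) (a : List (List Int)) (s : Nat)
    (ha : a.length = K) (hs : s % K = 0) : pvPick K i s a = [a.getD i []] := by
  have hmod : ∀ t, t < K → (s + t) % K = t := by
    intro t ht
    rw [Nat.add_mod, hs, Nat.zero_add, Nat.mod_mod_of_dvd _ dvd_rfl, Nat.mod_eq_of_lt ht]
  have hsplit : a = a.take i ++ a.drop i := (List.take_append_drop i a).symm
  rw [hsplit, pvPick_append]
  have hlen_take : (a.take i).length = i := by simp [ha]; omega
  have h1 : pvPick K i s (a.take i) = [] := by
    apply pvPick_none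
    intro t ht
    rw [hlen_take] at ht
    rw [hmod t (by omega)]
    omega
  obtain ⟨x, rest, hx⟩ : ∃ x rest, a.drop i = x :: rest := by
    cases hd : a.drop i with
    | nil => exfalso; have := List.length_drop (l := a) (i := i); rw [hd] at this; simp at this; omega
    | cons x rest => exact ⟨x, rest, rfl⟩
  have hxval : x = a.getD i [] := by
    have : (a.drop i).head? = a[i]? := by
      rw [List.head?_drop]
    rw [hx] at this
    simp at this
    rw [List.getD_eq_getElem?_getD, ← this]
    rfl
  have hrest_len : rest.length = K - i - 1 := by
    have := List.length_drop (l := a) (i := i)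
    rw [hx] at this; simp at this; omega
  rw [h1, hx, List.nil_append, hlen_take]
  simp only [pvPick]
  rw [if_pos (hmod i hi)]
  have h2 : pvPick K i (s + i + 1) rest = [] := by
    apply pvPick_none
    intro t ht
    rw [hrest_len] at ht
    have : s + i + 1 + t = s + (i + 1 + t) := by omega
    rw [this, hmod (i + 1 + t) (by omega)]
    omega
  rw [h2, hxval]
  have hfin : (List.take i a ++ a.getD i [] :: rest).getD i [] = a.getD i [] := by
    rw [List.getD_eq_getElem?_getD, List.getElem?_append_right (by omega), hlen_take]
    simp
  rw [hfin]

-- picks over M aligned blocks = the strided gather by index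
lemma pvPick_MK (K i : Nat) (hi : i < K) :
    ∀ (M : Nat) (rows : List (List Int)) (s : Nat), rows.length = M * K → s % K = 0 →
      pvPick K i s rows = (List.range M).map (fun j => rows.getD (j * K + i) []) := by
  intro M
  induction M with
  | zero =>
    intro rows s hlen _
    have : rows = [] := List.eq_nil_of_length_eq_zero (by omega)
    simp [this, pvPick]
  | succ M ih =>
    intro rows s hlen hs
    have hK : 0 < K := by omega
    have hKle : K ≤ rows.length := by rw [hlen]; calc K = 1 * K := by omega
                                                   _ ≤ (M + 1) * K := Nat.mul_le_mul_right K (by omega)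
    have hsplit : rows = rows.take K ++ rows.drop K := (List.take_append_drop K rows).symm
    rw [hsplit, pvPick_append]
    have hlen_take : (rows.take K).length = K := by simp; omega
    rw [pvPick_block K i hi _ s hlen_take hs, hlen_take]
    have hdroplen : (rows.drop K).length = M * K := by simp [hlen]; ring_nf; omega
    rw [ih (rows.drop K) (s + K) hdroplen (by rwa [Nat.add_mod_right])]
    have hhead : (List.take K rows).getD i [] = rows.getD (0 * K + i) [] := by
      rw [List.getD_eq_getElem?_getD, List.getD_eq_getElem?_getD, List.getElem?_take]
      simp [hi]
    have htail : (List.range M).map (fun j => (List.drop K rows).getD (j * K + i) []) =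
        (List.range M).map (fun j => rows.getD ((j + 1) * K + i) []) := by
      apply List.map_congr_left
      intro j _
      rw [List.getD_eq_getElem?_getD, List.getD_eq_getElem?_getD, List.getElem?_drop]
      have h3 : K + (j * K + i) = (j + 1) * K + i := by ring
      rw [h3]
    rw [List.range_succ_eq_map, List.map_cons, List.map_map]
    simp only [Function.comp_def, List.singleton_append]
    rw [hhead, htail, ← hsplit]

-- the scatter pass, pointwise: bucket i collects exactly the rows at positions ≡ i (mod K)
lemma pvGroup_fold (k : Int) (K : Nat) (hK : (K : Int) = k) (hKpos : 0 < K) :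
    ∀ (rows : List (List Int)) (s : Nat) (acc : List (List (List Int))), acc.length = K →
      (((PySem.List.enumerate rows (s : Int)).foldl
          (fun acc p =>
            let i := PySem.Int.mod p.1 k
            PySem.List.pySetD acc i (PySem.List.pyGetD acc i [] ++ [p.2])) acc).length = K ∧
       ∀ i : Nat, i < K →
        ((PySem.List.enumerate rows (s : Int)).foldl
          (fun acc p =>
            let i := PySem.Int.mod p.1 k
            PySem.List.pySetD acc i (PySem.List.pyGetD acc i [] ++ [p.2])) acc).getD i [] =
          acc.getD i [] ++ pvPick K i s rows) := by
  intro rows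
  induction rows with
  | nil => intro s acc hacc; simp [PySem.List.enumerate, pvPick, hacc]
  | cons r rs ih =>
    intro s acc hacc
    rw [PySem.List.enumerate_cons]
    have hcast : (s : Int) + 1 = ((s + 1 : Nat) : Int) := by push_cast; ring
    have hmod : PySem.Int.mod (s : Int) k = ((s % K : Nat) : Int) := by
      rw [← hK]; exact PySem.Int.mod_natCast s K
    have hlt : s % K < K := Nat.mod_lt _ hKpos
    have hlen' : (acc.set (s % K) (acc.getD (s % K) [] ++ [r])).length = K := by
      simp [hacc]
    obtain ⟨ihlen, ihget⟩ := ih (s + 1) (acc.set (s % K) (acc.getD (s % K) [] ++ [r])) hlen'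
    simp only [List.foldl_cons, hmod, hcast, PySem.List.pySetD_natCast, PySem.List.pyGetD_natCast]
    refine ⟨ihlen, fun i hi => ?_⟩
    rw [ihget i hi]
    simp only [pvPick]
    by_cases hcase : s % K = i
    · subst hcase
      rw [if_pos rfl]
      have : (acc.set (s % K) (acc.getD (s % K) [] ++ [r])).getD (s % K) [] =
          acc.getD (s % K) [] ++ [r] := by
        rw [List.getD_eq_getElem?_getD, List.getElem?_set_self (by omega)]
        rfl
      rw [this, List.append_assoc]
      rfl
    · rw [if_neg hcase]
      have : (acc.set (s % K) (acc.getD (s % K) [] ++ [r])).getD i [] = acc.getD i [] := by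
        rw [List.getD_eq_getElem?_getD, List.getElem?_set_ne hcase]
        rfl
      rw [this]

-- ===== VERDICT (by name: the statement is the Claim_ definition above) =====
theorem generate_average_quasi_polynomial_spec : Claim_equal_generate_average_quasi_polynomial := by
  intro k qp _ hpre
  obtain ⟨hne, hkpos, hmod⟩ := hpre
  show generate_average_quasi_polynomial k qp = generate_average_quasi_polynomial_alt k qp
  have hdvd : k ∣ (qp.length : Int) := (PySem.Int.mod_eq_zero_iff_dvd _ _).mp hmod
  have hn : 0 < qp.length := List.length_pos_iff.mpr hne
  set n := qp.length with hn_def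
  set K := k.toNat with hK_def
  have hKk : (K : Int) = k := Int.toNat_of_nonneg (le_of_lt hkpos)
  have hKpos : 0 < K := by omega
  have hKdvd : K ∣ n := by
    have := hdvd; rw [← hKk] at this; exact_mod_cast this
  set M := n / K with hM_def
  have hMK : M * K = n := Nat.div_mul_cancel hKdvd
  have hcast : ((n : Int)) / ((K : Nat) : Int) = (M : Int) := by
    rw [hM_def, Int.natCast_div]
  have hd : (PySem.Int.truncdiv (n : Int) k) = (M : Int) := by
    unfold PySem.Int.truncdiv
    rw [Int.tdiv_eq_ediv_of_dvd hdvd, ← hKk, hcast]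
  have hjKn : ∀ j : Nat, j < M → j * K + K ≤ n := by
    intro j hj
    have h1 : (j + 1) * K ≤ n := by
      rw [← hMK]; exact Nat.mul_le_mul_right K (by omega)
    have h2 : (j + 1) * K = j * K + K := by ring
    omega
  set z : List Int := List.replicate ((PySem.List.pyGet? qp 0).getD []).length 0 with hz_def
  -- A side: unfold to a per-residue fold over Nat range M
  have hA : generate_average_quasi_polynomial k qp =
      (List.range K).map (fun i =>
        (List.range M).foldl
          (fun s j => List.zipWith (· + ·) s (qp.getD (i + j * K) [])) z) := by
    simp only [generate_average_quasi_polynomial, ← hn_def, hd, ← hz_def,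
      PySem.List.pyRange_one, zero_add, sub_zero, Int.toNat_natCast, ← hK_def,
      List.map_map, List.foldl_map]
    apply List.map_congr_left
    intro i hi
    rw [List.mem_range] at hi
    apply PySem.List.foldl_congr_mem
    intro acc j hj
    rw [List.mem_range] at hj
    have hidx : (i : Int) + (j : Int) * k = ((i + j * K : Nat) : Int) := by
      rw [← hKk]; push_cast; ring
    have hlt : i + j * K < n := by
      have := hjKn j hj; omega
    have hmodid : PySem.Int.mod ((i : Int) + (j : Int) * k) (n : Int) = ((i + j * K : Nat) : Int) := by
      rw [hidx, PySem.Int.mod_eq_emod_of_pos (by exact_mod_cast hn)]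
      exact Int.emod_eq_of_lt (by positivity) (by exact_mod_cast hlt)
    rw [hmodid, PySem.List.pyGet?_natCast]
    simp [List.getD_eq_getElem?_getD]
  -- B side: the scatter pass groups the rows; each bucket is the strided gather, then
  -- pvZip_sum_fold turns the column sums into the elementwise fold
  have hinit : ((PySem.List.pyRange 0 k).map (fun _ => ([] : List (List Int)))).length = K := by
    simp [PySem.List.length_pyRange_one, ← hKk]
  obtain ⟨hblen, hbget⟩ := pvGroup_fold k K hKk hKpos qp 0 _ hinit
  have henum0 : PySem.List.enumerate qp = PySem.List.enumerate qp ((0 : Nat) : Int) := by norm_num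
  rw [← henum0] at hblen hbget
  have hinitget : ∀ i : Nat, i < K →
      ((PySem.List.pyRange 0 k).map (fun _ => ([] : List (List Int)))).getD i [] = [] := by
    intro i hi
    rw [List.getD_eq_getElem?_getD]
    rcases h : ((PySem.List.pyRange 0 k).map (fun _ => ([] : List (List Int))))[i]? with _ | v
    · rfl
    · have := List.mem_of_getElem? h
      simp at this
      simp [this]
  have hbg : ∀ i : Nat, i < K →
      ((PySem.List.enumerate qp).foldl
        (fun acc p =>
          let i := PySem.Int.mod p.1 k
          PySem.List.pySetD acc i (PySem.List.pyGetD acc i [] ++ [p.2]))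
        ((PySem.List.pyRange 0 k).map (fun _ => ([] : List (List Int))))).getD i [] =
        pvPick K i 0 qp := by
    intro i hi
    rw [hbget i hi, hinitget i hi, List.nil_append]
  have hB : generate_average_quasi_polynomial_alt k qp =
      (List.range K).map (fun i =>
        ((List.range M).map (fun j => qp.getD (j * K + i) [])).foldl
          (List.zipWith (· + ·)) z) := by
    simp only [generate_average_quasi_polynomial_alt, ← hz_def]
    set buckets := (PySem.List.enumerate qp).foldl
      (fun acc p =>
        let i := PySem.Int.mod p.1 k
        PySem.List.pySetD acc i (PySem.List.pyGetD acc i [] ++ [p.2]))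
      ((PySem.List.pyRange 0 k).map (fun _ => ([] : List (List Int)))) with hbdef
    have hblen' : buckets.length = K := by rw [hbdef]; exact hblen
    have hb' : buckets = (List.range K).map (fun i => buckets.getD i []) := by
      conv_lhs => rw [← pvMap_range_getD buckets []]
      rw [hblen']
    rw [hb', List.map_map]
    apply List.map_congr_left
    intro i hi
    rw [List.mem_range] at hi
    simp only [Function.comp_def]
    have hbi : buckets.getD i [] = pvPick K i 0 qp := by rw [hbdef]; exact hbg i hi
    rw [hbi, pvPick_MK K i hi M qp 0 (by omega) (Nat.zero_mod K), pvZip_sum_fold]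
  rw [hA, hB]
  apply List.map_congr_left
  intro i hi
  rw [List.foldl_map]
  apply PySem.List.foldl_congr_mem
  intro acc j hj
  rw [Nat.add_comm]
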